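-- pv_equiv track=rewrite | github.com/jwalbers/imladris | tools/seed_patients.py | _luhn_check_char
-- ===== SOURCE A (Python) =====
-- _LUHN_CHARS = "0123456789ACDEFGHJKLMNPRTUVWXY"
--
-- _LUHN_MAP = {ch: i for i, ch in enumerate(_LUHN_CHARS)}
--
-- def _luhn_check_char(base: str) -> str:
--     """Return the LuhnMod30 check character for *base* (uppercase, no dashes)."""
--     total = 0
--     double_next = True   # rightmost base char is doubled (OpenMRS convention)
--     for ch in reversed(base.upper()):
--         val = _LUHN_MAP[ch]
--         if double_next:
--             val *= 2
--             if val >= 30: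
--                 val -= 29
--         total += val
--         double_next = not double_next
--     check_index = (30 - (total % 30)) % 30
--     return _LUHN_CHARS[check_index]
-- ===== SOURCE B (Python) =====
-- _LUHN_CHARS = "0123456789ACDEFGHJKLMNPRTUVWXY"
--
-- _LUHN_MAP = {ch: i for i, ch in enumerate(_LUHN_CHARS)}
--
-- def _double(v):
--     d = v * 2
--     return d - 29 if d >= 30 else d
--
-- def _luhn_check_char(base: str) -> str:
--     """Return the LuhnMod30 check character for *base* (uppercase, no dashes)."""
--     rev = base.upper()[::-1]
--     total = sum(_double(_LUHN_MAP[c]) for c in rev[0::2]) \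
--           + sum(_LUHN_MAP[c] for c in rev[1::2])
--     return _LUHN_CHARS[(30 - total % 30) % 30]
-- ===== Notes on version B (the rewrite author's own statement) =====
-- stated objective: alternative
-- what changed: Replaces the running parity-toggle accumulator loop with two positional slices of the reversed string (rev[0::2] doubled, rev[1::2] plain) summed independently.
import Mathlib
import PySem

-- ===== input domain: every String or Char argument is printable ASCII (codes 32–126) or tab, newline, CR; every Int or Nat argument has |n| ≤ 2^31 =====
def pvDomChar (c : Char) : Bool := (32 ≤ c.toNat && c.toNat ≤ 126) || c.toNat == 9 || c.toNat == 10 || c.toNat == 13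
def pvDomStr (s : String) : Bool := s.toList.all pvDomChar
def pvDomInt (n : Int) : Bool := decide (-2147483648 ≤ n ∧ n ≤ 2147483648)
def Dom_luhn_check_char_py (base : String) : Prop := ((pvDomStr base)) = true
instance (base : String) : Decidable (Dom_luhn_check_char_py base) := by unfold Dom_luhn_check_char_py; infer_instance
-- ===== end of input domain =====

-- B replaces A's running parity-toggle loop by slicing the reversed string into its doubled
-- (rev[0::2]) and plain (rev[1::2]) positions and summing the two groups independently
-- (objective: alternative decomposition, same cost).

-- Shared module-level constants: _LUHN_CHARS and the dict _LUHN_MAP.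
def pvLuhnChars : List Char := "0123456789ACDEFGHJKLMNPRTUVWXY".toList

def pvLuhnMap : PySem.Dict Char Int :=
  (PySem.List.enumerate pvLuhnChars 0).foldl
    (fun d p => d.insert p.2 p.1) PySem.Dict.empty

-- _LUHN_MAP[ch]; the dict lookup (getD 0 only reached where Python would raise KeyError,
-- excluded by Pre_).
def pvLuhnVal (c : Char) : Int := (pvLuhnMap.get? c).getD 0

-- ===== PORT A =====
def luhn_check_char_py (base : String) : String :=
  let st := ((PySem.Str.upper base).toList.reverse).foldl
    (fun (st : Int × Bool) ch =>
      let val := pvLuhnVal ch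
      let val := if st.2 = true then
          (let v2 := val * 2; if 30 ≤ v2 then v2 - 29 else v2)
        else val
      (st.1 + val, !st.2)) (0, true)
  let checkIndex := PySem.Int.mod (30 - PySem.Int.mod st.1 30) 30
  match PySem.List.pyGet? pvLuhnChars checkIndex with
  | some c => String.ofList [c]
  | none => ""   -- unreachable: 0 ≤ checkIndex < 30

-- ===== PORT B =====
-- helper _double of Source B
def pvDouble (v : Int) : Int := let d := v * 2; if 30 ≤ d then d - 29 else d

def luhn_check_char_py_alt (base : String) : String :=
  let rev := (PySem.Str.upper base).toList.reverse   -- base.upper()[::-1]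
  let total :=
    (((PySem.List.slice? rev (some 0) none 2).getD []).map (fun c => pvDouble (pvLuhnVal c))).sum
    + (((PySem.List.slice? rev (some 1) none 2).getD []).map pvLuhnVal).sum
  let checkIndex := PySem.Int.mod (30 - PySem.Int.mod total 30) 30
  match PySem.List.pyGet? pvLuhnChars checkIndex with
  | some c => String.ofList [c]
  | none => ""

-- ===== PRECONDITION & SPEC =====
-- Pre_ excludes exactly the inputs on which A raises KeyError: a character of the
-- upper-cased base outside the Luhn alphabet.
def Pre_luhn_check_char_py (base : String) : Prop :=
  ((PySem.Str.upper base).toList.all (fun c => pvLuhnChars.contains c)) = true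
instance (base : String) : Decidable (Pre_luhn_check_char_py base) := by
  unfold Pre_luhn_check_char_py; infer_instance

def pvWitness_luhn_check_char_py : String := "A19"

def Spec_luhn_check_char_py (base : String) (out : String) : Prop :=
  out = luhn_check_char_py_alt base
instance (base : String) (out : String) : Decidable (Spec_luhn_check_char_py base out) := by
  unfold Spec_luhn_check_char_py; infer_instance

-- ===== CLAIM (what is proved, stated in full; the proofs are below) =====
def Claim_equal_luhn_check_char_py : Prop :=
  ∀ (base : String), Dom_luhn_check_char_py base → Pre_luhn_check_char_py base →
    Spec_luhn_check_char_py base (luhn_check_char_py base)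

-- ===== LEMMAS AND PROOFS =====

-- elements at even positions
def pvEvens {α : Type} : List α → List α
  | [] => []
  | [a] => [a]
  | a :: _ :: t => a :: pvEvens t

-- elements at odd positions
def pvOdds {α : Type} : List α → List α
  | [] => []
  | [_] => []
  | _ :: b :: t => b :: pvOdds t

theorem pv_range_evens {α : Type} (l : List α) :
    (List.range ((l.length + 1) / 2)).filterMap (fun k => l[2 * k]?) = pvEvens l := by
  induction l using pvEvens.induct with
  | case1 => simp [pvEvens]
  | case2 a => simp [pvEvens, List.range_succ]
  | case3 a b t ih =>
    have hc : ((a :: b :: t).length + 1) / 2 = (t.length + 1) / 2 + 1 := by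
      simp; omega
    rw [hc, List.range_succ_eq_map]
    simp only [List.filterMap_cons, List.filterMap_map]
    have : (fun k => (a :: b :: t)[2 * Nat.succ k]?) = (fun k => t[2 * k]?) := by
      funext k
      have h2 : 2 * Nat.succ k = 2 * k + 1 + 1 := by omega
      rw [h2]
      simp
    simp only [Function.comp_def]
    simp only [Nat.mul_zero, List.getElem?_cons_zero, pvEvens]
    rw [show (fun k => (a :: b :: t)[2 * (k + 1)]?) = (fun k => t[2 * k]?) from by
      funext k; have h2 : 2 * (k + 1) = 2 * k + 1 + 1 := by omega
      rw [h2]; simp]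
    simp [ih]

theorem pv_range_odds {α : Type} (l : List α) :
    (List.range (l.length / 2)).filterMap (fun k => l[2 * k + 1]?) = pvOdds l := by
  induction l using pvOdds.induct with
  | case1 => simp [pvOdds]
  | case2 a => simp [pvOdds]
  | case3 a b t ih =>
    have hc : (a :: b :: t).length / 2 = t.length / 2 + 1 := by simp; omega
    rw [hc, List.range_succ_eq_map]
    simp only [List.filterMap_cons, List.filterMap_map]
    simp only [Nat.mul_zero, Nat.zero_add, List.getElem?_cons_succ, List.getElem?_cons_zero,
      pvOdds]
    rw [show (fun x => ((fun k => (b :: t)[2 * k]?) ∘ Nat.succ) x) = (fun k => t[2 * k + 1]?) from by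
      funext k
      have h2 : 2 * Nat.succ k = 2 * k + 1 + 1 := by omega
      simp only [Function.comp_apply, h2]
      simp]
    simp [ih]

theorem pv_slice_evens {α : Type} (l : List α) :
    PySem.List.slice? l (some 0) none 2 = some (pvEvens l) := by
  rw [← pv_range_evens]
  unfold PySem.List.slice? PySem.List.sliceIndices
  norm_num
  have hcnt : (if 0 < l.length then (((l.length : Int) + 2 - 1) / 2).toNat else 0)
      = (l.length + 1) / 2 := by split <;> omega
  rw [hcnt]
  simp only [show ∀ x : Nat, ((2 : Int) * (x : Int)).toNat = 2 * x from fun x => by omega]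

theorem pv_slice_odds {α : Type} (l : List α) :
    PySem.List.slice? l (some 1) none 2 = some (pvOdds l) := by
  rw [← pv_range_odds]
  unfold PySem.List.slice? PySem.List.sliceIndices
  norm_num
  rcases Nat.eq_zero_or_pos l.length with h | h
  · simp [h]
  · have hmin : min (1 : Int) (l.length : Int) = 1 := by omega
    rw [hmin]
    have hcnt : (if 1 < l.length then (((l.length : Int) - 1 + 2 - 1) / 2).toNat else 0)
        = l.length / 2 := by split <;> omega
    rw [hcnt]
    simp only [show ∀ x : Nat, ((1 : Int) + 2 * (x : Int)).toNat = 2 * x + 1 from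
      fun x => by omega]

-- A's fold, characterised by the even/odd position groups.
theorem pv_fold_char (l : List Char) : ∀ total : Int,
    ((l.foldl (fun (st : Int × Bool) ch =>
      let val := pvLuhnVal ch
      let val := if st.2 = true then
          (let v2 := val * 2; if 30 ≤ v2 then v2 - 29 else v2)
        else val
      (st.1 + val, !st.2)) (total, true)).1
      = total + ((pvEvens l).map (fun c => pvDouble (pvLuhnVal c))).sum
              + ((pvOdds l).map pvLuhnVal).sum) := by
  induction l using pvEvens.induct with
  | case1 => intro total; simp [pvEvens, pvOdds]
  | case2 a => intro total; simp [pvEvens, pvOdds, pvDouble]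
  | case3 a b t ih =>
    intro total
    rw [List.foldl_cons, List.foldl_cons]
    change (List.foldl _ (total + pvDouble (pvLuhnVal a) + pvLuhnVal b, true) t).1 = _
    rw [ih]
    simp [pvEvens, pvOdds]
    ring

-- ===== VERDICT (by name: the statement is the Claim_ definition above) =====
theorem luhn_check_char_py_spec : Claim_equal_luhn_check_char_py := by
  intro base _ _
  unfold Spec_luhn_check_char_py luhn_check_char_py luhn_check_char_py_alt
  simp only [pv_slice_evens, pv_slice_odds, Option.getD_some, pv_fold_char, Int.zero_add]
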